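-- pv_equiv track=rewrite | github.com/Melodiz/dailycode | Algorithms/some_intern_contests/tinkoff_summer/task5/test_cnt.py | rest
-- ===== SOURCE A (Python) =====
-- def corners(x, y, a, b):
--     if x == 0 and y == 0: return 0
--     if x == 1 and y == 1: return min(a, 2*b)
--     if x == 2 and y == 0 or x == 0 and y == 2: return b
--     if x == 0 and y > 2: return y//2 * b
--     if y == 0 and x > 2: return x//2 * b
--     if x == 1 and y > 2: return min(a, 2*b)+ (y-1)//2 * b
--     if y == 1 and x > 2: return min(a, 2*b)+ (x-1)//2 * b
--
-- def rest(cnt_open, cnt_close, a, b):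
--     cost = 0
--     while min(cnt_open, cnt_close) >= 2:
--         if a < 2*b: # cheaper than 4 changes
--             cost += a
--             cnt_open -= 2
--             cnt_close -= 2
--         else:
--             cost += b
--             if cnt_open > cnt_close:
--                 cnt_open -=2
--             else:
--                 cnt_close -=2
--     # if cnt_open == 0 and cnt_close == 0: return cost
--     # if cnt_open == 0 and cnt_close > 0: return cost + b * cnt_close//2
--     # if cnt_open > 0 and cnt_close == 0: return cost + b * cnt_open//2
--     # if cnt_close == 1:
--     #     if a<2*b:return cost + min(a, 2*b) + ((cnt_open-1)//2)*b
--     #     else: return cost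
--     # if cnt_open == 1: return cost + min(a, 2*b) + ((cnt_close-1)//2)*b
--     # return -1
--     return cost + corners(cnt_open, cnt_close, a, b)
-- ===== SOURCE B (Python) =====
-- def rest(cnt_open, cnt_close, a, b):
--     # Closed-form: no loop.  With m = min, d = max - min:
--     #  - if a < 2*b the loop pairs up min(open,close) and the leftover corners
--     #    cases collapse to ceil(m/2)*a + (d//2)*b;
--     #  - otherwise every step (loop or corners) costs b per pair of removed
--     #    brackets, which collapses to (m + d//2 + m%2)*b.
--     m = min(cnt_open, cnt_close)
--     d = max(cnt_open, cnt_close) - m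
--     if a < 2 * b:
--         return ((m + 1) // 2) * a + (d // 2) * b
--     return (m + d // 2 + m % 2) * b
-- ===== Notes on version B (the rewrite author's own statement) =====
-- stated objective: faster
-- what changed: The decrement loop plus the corners case table is replaced by a single closed-form arithmetic formula in min, max-min and the parity of min.
import Mathlib
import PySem

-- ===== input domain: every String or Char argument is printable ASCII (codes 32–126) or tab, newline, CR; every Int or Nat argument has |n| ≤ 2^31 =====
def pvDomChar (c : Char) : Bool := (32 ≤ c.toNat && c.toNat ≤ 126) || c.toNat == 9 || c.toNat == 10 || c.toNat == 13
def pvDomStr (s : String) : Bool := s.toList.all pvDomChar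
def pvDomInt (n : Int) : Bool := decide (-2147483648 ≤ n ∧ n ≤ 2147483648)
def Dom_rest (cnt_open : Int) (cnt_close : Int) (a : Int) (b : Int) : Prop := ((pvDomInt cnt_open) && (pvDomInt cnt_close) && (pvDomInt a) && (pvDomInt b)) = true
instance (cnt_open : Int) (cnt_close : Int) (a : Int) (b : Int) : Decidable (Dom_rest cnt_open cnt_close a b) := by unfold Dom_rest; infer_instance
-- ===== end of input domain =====

-- B replaces A's decrement loop + `corners` case table by one closed-form arithmetic
-- formula (objective: faster, O(1) instead of O(cnt_open+cnt_close)).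

-- ===== PORT A =====
-- `corners` returns None in Python when no branch fires; we port it as Option Int
-- (none = the fall-through, on which `rest` raises TypeError — excluded by Pre_rest).
def corners (x : Int) (y : Int) (a : Int) (b : Int) : Option Int :=
  if x = 0 ∧ y = 0 then some 0
  else if x = 1 ∧ y = 1 then some (min a (2*b))
  else if (x = 2 ∧ y = 0) ∨ (x = 0 ∧ y = 2) then some b
  else if x = 0 ∧ y > 2 then some (PySem.Int.floordiv y 2 * b)
  else if y = 0 ∧ x > 2 then some (PySem.Int.floordiv x 2 * b)
  else if x = 1 ∧ y > 2 then some (min a (2*b) + PySem.Int.floordiv (y-1) 2 * b)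
  else if y = 1 ∧ x > 2 then some (min a (2*b) + PySem.Int.floordiv (x-1) 2 * b)
  else none

-- A's while-loop, step for step; where Python would raise (corners = none) the value
-- is unclaimed (getD 0), and Pre_rest excludes exactly those inputs.
def restLoop (cnt_open : Int) (cnt_close : Int) (a : Int) (b : Int) (cost : Int) : Int :=
  if _h : 2 ≤ min cnt_open cnt_close then
    if a < 2*b then restLoop (cnt_open-2) (cnt_close-2) a b (cost+a)
    else if cnt_open > cnt_close then restLoop (cnt_open-2) cnt_close a b (cost+b)
    else restLoop cnt_open (cnt_close-2) a b (cost+b)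
  else cost + (corners cnt_open cnt_close a b).getD 0
termination_by (cnt_open + cnt_close).toNat
decreasing_by all_goals omega

def rest (cnt_open : Int) (cnt_close : Int) (a : Int) (b : Int) : Int :=
  restLoop cnt_open cnt_close a b 0

-- ===== PORT B =====
def rest_alt (cnt_open : Int) (cnt_close : Int) (a : Int) (b : Int) : Int :=
  let m := min cnt_open cnt_close
  let d := max cnt_open cnt_close - m
  if a < 2*b then PySem.Int.floordiv (m+1) 2 * a + PySem.Int.floordiv d 2 * b
  else (m + PySem.Int.floordiv d 2 + PySem.Int.mod m 2) * b

-- ===== PRECONDITION & SPEC =====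
-- Pre_rest holds exactly where Python's A returns normally: A raises TypeError
-- (corners falls through and returns None) on negative counts and whenever the
-- leftover pair after the loop differs by exactly 1.
def Pre_rest (cnt_open : Int) (cnt_close : Int) (a : Int) (b : Int) : Prop :=
  0 ≤ cnt_open ∧ 0 ≤ cnt_close ∧
  (2 ≤ min cnt_open cnt_close → a < 2*b → (cnt_open - cnt_close ≠ 1 ∧ cnt_close - cnt_open ≠ 1)) ∧
  (2 ≤ min cnt_open cnt_close → 2*b ≤ a → (cnt_open + cnt_close) % 2 = 0) ∧
  (min cnt_open cnt_close < 2 →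
    ¬((cnt_open - cnt_close = 1 ∨ cnt_close - cnt_open = 1) ∧ max cnt_open cnt_close ≤ 2))
instance (cnt_open : Int) (cnt_close : Int) (a : Int) (b : Int) : Decidable (Pre_rest cnt_open cnt_close a b) := by unfold Pre_rest; infer_instance

def pvWitness_rest : Int × Int × Int × Int := (4, 4, 3, 1)

def Spec_rest (cnt_open : Int) (cnt_close : Int) (a : Int) (b : Int) (out : Int) : Prop := out = rest_alt cnt_open cnt_close a b
instance (cnt_open : Int) (cnt_close : Int) (a : Int) (b : Int) (out : Int) : Decidable (Spec_rest cnt_open cnt_close a b out) := by unfold Spec_rest; infer_instance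

-- ===== CLAIM (what is proved, stated in full; the proofs are below) =====
def Claim_equal_rest : Prop := ∀ (cnt_open : Int) (cnt_close : Int) (a : Int) (b : Int), Dom_rest cnt_open cnt_close a b → Pre_rest cnt_open cnt_close a b → Spec_rest cnt_open cnt_close a b (rest cnt_open cnt_close a b)
-- ===== LEMMAS AND PROOFS =====

-- B's formula with Python floor-division/modulo rewritten to Lean's `/` and `%`
-- (for divisor 2 they coincide: Int.fdiv_eq_ediv_of_nonneg / Int.fmod_eq_emod).
lemma rest_alt_eq (o c a b : Int) :
    rest_alt o c a b =
      if a < 2*b then ((min o c + 1) / 2) * a + ((max o c - min o c) / 2) * b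
      else (min o c + (max o c - min o c) / 2 + (min o c) % 2) * b := by
  have hfd : ∀ x : Int, PySem.Int.floordiv x 2 = x / 2 :=
    fun x => Int.fdiv_eq_ediv_of_nonneg x (by norm_num)
  have hfm : ∀ x : Int, PySem.Int.mod x 2 = x % 2 := by
    intro x; show x.fmod 2 = x % 2; simp [Int.fmod_eq_emod]
  simp only [rest_alt, hfd, hfm]

-- the value of `corners` on every non-crashing leftover state equals B's formula
lemma corners_eq (o c a b : Int) (ho : 0 ≤ o) (hc : 0 ≤ c) (hm : min o c < 2)
    (hok : ¬((o - c = 1 ∨ c - o = 1) ∧ max o c ≤ 2)) :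
    (corners o c a b).getD 0 = rest_alt o c a b := by
  have hfd : ∀ x : Int, PySem.Int.floordiv x 2 = x / 2 :=
    fun x => Int.fdiv_eq_ediv_of_nonneg x (by norm_num)
  unfold corners
  split_ifs with h1 h2 h3 h4 h5 h6 h7
  · -- (0,0)
    obtain ⟨rfl, rfl⟩ := h1; rw [rest_alt_eq]; norm_num
  · -- (1,1)
    obtain ⟨rfl, rfl⟩ := h2
    rw [rest_alt_eq]; simp only [Option.getD_some]
    by_cases hab : a < 2*b
    · rw [if_pos hab, min_eq_left (by omega : a ≤ 2*b)]; norm_num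
    · rw [if_neg hab, min_eq_right (by omega : 2*b ≤ a)]; norm_num
  · -- (2,0) or (0,2)
    rcases h3 with ⟨rfl, rfl⟩ | ⟨rfl, rfl⟩ <;> rw [rest_alt_eq] <;>
      simp only [Option.getD_some] <;> split_ifs <;> norm_num
  · -- (0, y>2)
    obtain ⟨rfl, hy⟩ := h4
    rw [rest_alt_eq]; simp only [Option.getD_some, hfd]
    rw [min_eq_left hc, max_eq_right hc]
    split_ifs <;> norm_num
  · -- (x>2, 0)
    obtain ⟨rfl, hx⟩ := h5
    rw [rest_alt_eq]; simp only [Option.getD_some, hfd]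
    rw [min_eq_right ho, max_eq_left ho]
    split_ifs <;> norm_num
  · -- (1, y>2)
    obtain ⟨rfl, hy⟩ := h6
    rw [rest_alt_eq]; simp only [Option.getD_some, hfd]
    rw [min_eq_left (by omega : (1:Int) ≤ c), max_eq_right (by omega : (1:Int) ≤ c)]
    by_cases hab : a < 2*b
    · rw [if_pos hab, min_eq_left (by omega : a ≤ 2*b)]
      have h12 : (1 + 1 : Int) / 2 = 1 := by norm_num
      rw [h12]; ring
    · rw [if_neg hab, min_eq_right (by omega : 2*b ≤ a)]
      have e : (1 : Int) + (c - 1) / 2 + 1 % 2 = 2 + (c - 1) / 2 := by omega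
      rw [e]; ring
  · -- (x>2, 1)
    obtain ⟨hy, hx⟩ := h7
    subst hy
    rw [rest_alt_eq]; simp only [Option.getD_some, hfd]
    rw [min_eq_right (by omega : (1:Int) ≤ o), max_eq_left (by omega : (1:Int) ≤ o)]
    by_cases hab : a < 2*b
    · rw [if_pos hab, min_eq_left (by omega : a ≤ 2*b)]
      have h12 : (1 + 1 : Int) / 2 = 1 := by norm_num
      rw [h12]; ring
    · rw [if_neg hab, min_eq_right (by omega : 2*b ≤ a)]
      have e : (1 : Int) + (o - 1) / 2 + 1 % 2 = 2 + (o - 1) / 2 := by omega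
      rw [e]; ring
  · -- fall-through is impossible under the hypotheses
    exfalso; omega

-- A's loop equals cost + B's formula, by induction on a bound for (o+c).toNat
lemma restLoop_eq (a b : Int) (n : Nat) : ∀ (o c cost : Int), (o + c).toNat ≤ n →
    0 ≤ o → 0 ≤ c →
    (2 ≤ min o c → a < 2*b → (o - c ≠ 1 ∧ c - o ≠ 1)) →
    (2 ≤ min o c → 2*b ≤ a → (o + c) % 2 = 0) →
    (min o c < 2 → ¬((o - c = 1 ∨ c - o = 1) ∧ max o c ≤ 2)) →
    restLoop o c a b cost = cost + rest_alt o c a b := by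
  induction n with
  | zero =>
    intro o c cost hn ho hc _ _ h5
    rw [restLoop, dif_neg (by omega)]
    rw [corners_eq o c a b ho hc (by omega) (h5 (by omega))]
  | succ n ih =>
    intro o c cost hn ho hc h3 h4 h5
    rw [restLoop]
    by_cases hm : 2 ≤ min o c
    · rw [dif_pos hm]
      by_cases hab : a < 2*b
      · rw [if_pos hab]
        have hd := h3 hm hab
        rw [ih (o-2) (c-2) (cost+a) (by omega) (by omega) (by omega)
              (by intro _ _; omega) (by omega) (by intro _; omega)]
        rw [rest_alt_eq, rest_alt_eq, if_pos hab, if_pos hab]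
        have e1 : (min o c + 1) / 2 = 1 + (min (o-2) (c-2) + 1) / 2 := by omega
        have e2 : (max o c - min o c) / 2 = (max (o-2) (c-2) - min (o-2) (c-2)) / 2 := by omega
        rw [e1, e2]; ring
      · rw [if_neg hab]
        have hpar := h4 hm (by omega)
        by_cases hoc : o > c
        · rw [if_pos hoc]
          rw [ih (o-2) c (cost+b) (by omega) (by omega) (by omega)
                (by intro _ h; omega) (by intro _ _; omega) (by intro _; omega)]
          rw [rest_alt_eq, rest_alt_eq, if_neg hab, if_neg hab]
          have e : min o c + (max o c - min o c) / 2 + (min o c) % 2 =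
              1 + (min (o-2) c + (max (o-2) c - min (o-2) c) / 2 + (min (o-2) c) % 2) := by
            omega
          rw [e]; ring
        · rw [if_neg hoc]
          rw [ih o (c-2) (cost+b) (by omega) (by omega) (by omega)
                (by intro _ h; omega) (by intro _ _; omega) (by intro _; omega)]
          rw [rest_alt_eq, rest_alt_eq, if_neg hab, if_neg hab]
          have e : min o c + (max o c - min o c) / 2 + (min o c) % 2 =
              1 + (min o (c-2) + (max o (c-2) - min o (c-2)) / 2 + (min o (c-2)) % 2) := by
            omega
          rw [e]; ring
    · rw [dif_neg hm]
      rw [corners_eq o c a b ho hc (by omega) (h5 (by omega))]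

-- ===== VERDICT (by name: the statement is the Claim_ definition above) =====
theorem rest_spec : Claim_equal_rest := by
  intro o c a b _ hpre
  obtain ⟨ho, hc, h3, h4, h5⟩ := hpre
  unfold Spec_rest rest
  rw [restLoop_eq a b (o + c).toNat o c 0 (le_refl _) ho hc h3 h4 h5]
  ring
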